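-- pv_equiv track=rewrite | github.com/FleurEoK/ThesisFleur | Falcon/heatmap_inference_detailed.py | form_rectangles_from_lines
-- ===== SOURCE A (Python) =====
-- def form_rectangles_from_lines(h_lines, v_lines, image_shape, min_size=50):
--     """
--     Form rectangles from detected horizontal and vertical lines.
--     """
--     height, width = image_shape[:2]
--     rectangles = []
--
--     # Try all combinations of 2 horizontal and 2 vertical lines
--     for i, h1 in enumerate(h_lines):
--         for j, h2 in enumerate(h_lines[i+1:], i+1):
--             for k, v1 in enumerate(v_lines):
--                 for l, v2 in enumerate(v_lines[k+1:], k+1):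
--
--                     # Get line positions
--                     h1_start, h1_end, h1_y = h1
--                     h2_start, h2_end, h2_y = h2
--                     v1_start, v1_end, v1_x = v1
--                     v2_start, v2_end, v2_x = v2
--
--                     # Check if lines can form a rectangle
--                     if abs(h1_y - h2_y) < min_size or abs(v1_x - v2_x) < min_size:
--                         continue
--
--                     # Calculate potential rectangle
--                     x = min(v1_x, v2_x)
--                     y = min(h1_y, h2_y)
--                     w = abs(v2_x - v1_x)
--                     h = abs(h2_y - h1_y)
--
--                     # Validate rectangle
--                     if (w >= min_size and h >= min_size and
--                         x >= 0 and y >= 0 and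
--                         x + w <= width and y + h <= height):
--                         rectangles.append((x, y, w, h))
--
--     return rectangles
-- ===== SOURCE B (Python) =====
-- def form_rectangles_from_lines(h_lines, v_lines, image_shape, min_size=50):
--     """Same rectangles as the quadruple loop, but the validity test is
--     separable: filter valid horizontal pairs and valid vertical pairs
--     independently, then emit their cross product in the same order."""
--     height, width = image_shape[:2]
--
--     def valid_pairs(lines, limit):
--         out = []
--         for i, a in enumerate(lines):
--             for b in lines[i + 1:]:
--                 lo = min(a[2], b[2])
--                 d = abs(a[2] - b[2])
--                 if d >= min_size and lo >= 0 and lo + d <= limit: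
--                     out.append((lo, d))
--         return out
--
--     h_pairs = valid_pairs(h_lines, height)   # (y, h)
--     v_pairs = valid_pairs(v_lines, width)    # (x, w)
--     return [(x, y, w, h) for (y, h) in h_pairs for (x, w) in v_pairs]
-- ===== Notes on version B (the rewrite author's own statement) =====
-- stated objective: faster
-- what changed: A tests every (h-pair, v-pair) quadruple; the validity test is separable, so B filters valid horizontal pairs and valid vertical pairs independently and emits their cross product in the same order.
import Mathlib
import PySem

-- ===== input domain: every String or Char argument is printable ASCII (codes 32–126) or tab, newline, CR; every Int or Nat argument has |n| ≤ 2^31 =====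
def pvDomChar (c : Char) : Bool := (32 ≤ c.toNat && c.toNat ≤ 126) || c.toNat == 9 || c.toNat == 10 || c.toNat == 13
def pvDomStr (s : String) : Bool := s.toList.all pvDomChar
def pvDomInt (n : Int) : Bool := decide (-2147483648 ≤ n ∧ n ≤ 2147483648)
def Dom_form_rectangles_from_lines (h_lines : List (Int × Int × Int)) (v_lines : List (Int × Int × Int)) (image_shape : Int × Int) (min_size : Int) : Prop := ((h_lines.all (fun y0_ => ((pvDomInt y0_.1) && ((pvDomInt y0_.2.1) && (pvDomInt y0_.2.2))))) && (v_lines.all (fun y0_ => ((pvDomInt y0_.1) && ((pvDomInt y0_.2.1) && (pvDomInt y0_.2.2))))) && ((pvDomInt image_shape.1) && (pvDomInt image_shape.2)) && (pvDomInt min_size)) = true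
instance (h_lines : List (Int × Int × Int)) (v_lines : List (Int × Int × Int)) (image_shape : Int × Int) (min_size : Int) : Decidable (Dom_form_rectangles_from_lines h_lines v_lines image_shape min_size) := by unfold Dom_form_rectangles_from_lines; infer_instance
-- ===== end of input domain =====

-- B replaces A's quadruple loop over (h-pair, v-pair) combinations by two independent
-- quadratic passes (valid h-pairs, valid v-pairs) and their cross product: faster.

-- ===== PORT A =====
def form_rectangles_from_lines (h_lines : List (Int × Int × Int)) (v_lines : List (Int × Int × Int)) (image_shape : Int × Int) (min_size : Int) : List (Int × Int × Int × Int) :=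
  let height := image_shape.1
  let width := image_shape.2
  (PySem.List.enumerate h_lines 0).foldl (fun acc ih =>
    (PySem.List.enumerate (PySem.List.slice h_lines (some (ih.1 + 1)) none) (ih.1 + 1)).foldl (fun acc jh =>
      (PySem.List.enumerate v_lines 0).foldl (fun acc kv =>
        (PySem.List.enumerate (PySem.List.slice v_lines (some (kv.1 + 1)) none) (kv.1 + 1)).foldl (fun acc lv =>
          let h1_y := ih.2.2.2
          let h2_y := jh.2.2.2
          let v1_x := kv.2.2.2
          let v2_x := lv.2.2.2
          if |h1_y - h2_y| < min_size ∨ |v1_x - v2_x| < min_size then acc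
          else
            let x := min v1_x v2_x
            let y := min h1_y h2_y
            let w := |v2_x - v1_x|
            let h := |h2_y - h1_y|
            if min_size ≤ w ∧ min_size ≤ h ∧ 0 ≤ x ∧ 0 ≤ y ∧ x + w ≤ width ∧ y + h ≤ height then
              acc ++ [(x, y, w, h)]
            else acc) acc) acc) acc) []

-- ===== PORT B =====
-- Source B's valid_pairs: the (lo, d) of every pair of lines whose span is valid on its own axis
def pvValidPairs (min_size limit : Int) (lines : List (Int × Int × Int)) : List (Int × Int) :=
  (PySem.List.enumerate lines 0).foldl (fun out ia =>
    (PySem.List.slice lines (some (ia.1 + 1)) none).foldl (fun out b =>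
      let lo := min ia.2.2.2 b.2.2
      let d := |ia.2.2.2 - b.2.2|
      if min_size ≤ d ∧ 0 ≤ lo ∧ lo + d ≤ limit then out ++ [(lo, d)] else out) out) []

def form_rectangles_from_lines_alt (h_lines : List (Int × Int × Int)) (v_lines : List (Int × Int × Int)) (image_shape : Int × Int) (min_size : Int) : List (Int × Int × Int × Int) :=
  let height := image_shape.1
  let width := image_shape.2
  let h_pairs := pvValidPairs min_size height h_lines
  let v_pairs := pvValidPairs min_size width v_lines
  h_pairs.flatMap (fun yh => v_pairs.map (fun xw => (xw.1, yh.1, xw.2, yh.2)))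

-- ===== PRECONDITION & SPEC =====
def Spec_form_rectangles_from_lines (h_lines : List (Int × Int × Int)) (v_lines : List (Int × Int × Int)) (image_shape : Int × Int) (min_size : Int) (out : List (Int × Int × Int × Int)) : Prop := out = form_rectangles_from_lines_alt h_lines v_lines image_shape min_size
instance (h_lines : List (Int × Int × Int)) (v_lines : List (Int × Int × Int)) (image_shape : Int × Int) (min_size : Int) (out : List (Int × Int × Int × Int)) : Decidable (Spec_form_rectangles_from_lines h_lines v_lines image_shape min_size out) := by unfold Spec_form_rectangles_from_lines; infer_instance

-- ===== CLAIM (what is proved, stated in full; the proofs are below) =====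
def Claim_equal_form_rectangles_from_lines : Prop := ∀ (h_lines : List (Int × Int × Int)) (v_lines : List (Int × Int × Int)) (image_shape : Int × Int) (min_size : Int), Dom_form_rectangles_from_lines h_lines v_lines image_shape min_size → Spec_form_rectangles_from_lines h_lines v_lines image_shape min_size (form_rectangles_from_lines h_lines v_lines image_shape min_size)

-- ===== LEMMAS AND PROOFS =====

-- structural ("head against tail") characterisation of the pair lists
def pvPairsF (m limit : Int) : List (Int × Int × Int) → List (Int × Int)
  | [] => []
  | a :: r =>
      r.flatMap (fun b =>
        if m ≤ |a.2.2 - b.2.2| ∧ 0 ≤ min a.2.2 b.2.2 ∧ min a.2.2 b.2.2 + |a.2.2 - b.2.2| ≤ limit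
        then [(min a.2.2 b.2.2, |a.2.2 - b.2.2|)] else []) ++ pvPairsF m limit r

theorem pv_drop_succ {α : Type} (L : List α) (s : Nat) (a : α) (xs : List α)
    (hx : L.drop s = a :: xs) : L.drop (s + 1) = xs := by
  have : L.drop (s + 1) = (L.drop s).drop 1 := by
    rw [List.drop_drop]
  simp [this, hx]

-- one row of Source B's valid_pairs: 'for b in lines[i+1:]: if ok: out.append((lo,d))'
theorem pv_brow (m limit : Int) (a : Int × Int × Int) :
    ∀ (r : List (Int × Int × Int)) (acc : List (Int × Int)),
      r.foldl (fun out b =>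
        if m ≤ |a.2.2 - b.2.2| ∧ 0 ≤ min a.2.2 b.2.2 ∧ min a.2.2 b.2.2 + |a.2.2 - b.2.2| ≤ limit
        then out ++ [(min a.2.2 b.2.2, |a.2.2 - b.2.2|)] else out) acc
      = acc ++ r.flatMap (fun b =>
          if m ≤ |a.2.2 - b.2.2| ∧ 0 ≤ min a.2.2 b.2.2 ∧ min a.2.2 b.2.2 + |a.2.2 - b.2.2| ≤ limit
          then [(min a.2.2 b.2.2, |a.2.2 - b.2.2|)] else []) := by
  intro r
  induction r with
  | nil => intro acc; simp
  | cons b r ih =>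
      intro acc
      rw [List.foldl_cons, List.flatMap_cons]
      split_ifs <;> (rw [ih]; simp)

theorem pvValidPairs_eq_pairsF_aux (m limit : Int) (L : List (Int × Int × Int)) :
    ∀ (xs : List (Int × Int × Int)) (s : Nat) (acc : List (Int × Int)), L.drop s = xs →
      (PySem.List.enumerate xs (s : Int)).foldl (fun out ia =>
        (PySem.List.slice L (some (ia.1 + 1)) none).foldl (fun out b =>
          let lo := min ia.2.2.2 b.2.2
          let d := |ia.2.2.2 - b.2.2|
          if m ≤ d ∧ 0 ≤ lo ∧ lo + d ≤ limit then out ++ [(lo, d)] else out) out) acc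
      = acc ++ pvPairsF m limit xs := by
  intro xs
  induction xs with
  | nil => intro s acc _; simp [PySem.List.enumerate, pvPairsF]
  | cons a r ih =>
      intro s acc hx
      rw [PySem.List.enumerate_cons, List.foldl_cons]
      have h1 : ((s : Int) + 1) = ((s + 1 : Nat) : Int) := by push_cast; ring
      rw [h1, PySem.List.slice_from_natCast, pv_drop_succ L s a r hx]
      rw [ih (s + 1) _ (pv_drop_succ L s a r hx)]
      show (List.foldl _ acc r) ++ _ = _
      rw [pv_brow m limit a r acc]
      simp [pvPairsF]

theorem pvValidPairs_eq_pairsF (m limit : Int) (lines : List (Int × Int × Int)) :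
    pvValidPairs m limit lines = pvPairsF m limit lines := by
  have h := pvValidPairs_eq_pairsF_aux m limit lines lines 0 [] (by simp)
  simpa [pvValidPairs] using h

-- A's two-test emission for one quadruple equals the separable test, B-oriented
theorem pv_emit_eq (m W Ht : Int) (h1 h2 v1 v2 : Int × Int × Int) (acc : List (Int × Int × Int × Int)) :
    (if |h1.2.2 - h2.2.2| < m ∨ |v1.2.2 - v2.2.2| < m then acc
     else
       if m ≤ |v2.2.2 - v1.2.2| ∧ m ≤ |h2.2.2 - h1.2.2| ∧ 0 ≤ min v1.2.2 v2.2.2 ∧ 0 ≤ min h1.2.2 h2.2.2 ∧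
          min v1.2.2 v2.2.2 + |v2.2.2 - v1.2.2| ≤ W ∧ min h1.2.2 h2.2.2 + |h2.2.2 - h1.2.2| ≤ Ht then
         acc ++ [(min v1.2.2 v2.2.2, min h1.2.2 h2.2.2, |v2.2.2 - v1.2.2|, |h2.2.2 - h1.2.2|)]
       else acc)
    = acc ++ (if (m ≤ |h1.2.2 - h2.2.2| ∧ 0 ≤ min h1.2.2 h2.2.2 ∧ min h1.2.2 h2.2.2 + |h1.2.2 - h2.2.2| ≤ Ht) ∧
                 (m ≤ |v1.2.2 - v2.2.2| ∧ 0 ≤ min v1.2.2 v2.2.2 ∧ min v1.2.2 v2.2.2 + |v1.2.2 - v2.2.2| ≤ W)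
              then [(min v1.2.2 v2.2.2, min h1.2.2 h2.2.2, |v1.2.2 - v2.2.2|, |h1.2.2 - h2.2.2|)] else []) := by
  rw [abs_sub_comm v2.2.2 v1.2.2, abs_sub_comm h2.2.2 h1.2.2]
  split_ifs <;> (simp_all; try omega)

-- A's innermost loop over later vertical lines, for fixed h1 h2 v1
theorem pv_arow (m W Ht : Int) (h1 h2 v1 : Int × Int × Int) :
    ∀ (r : List (Int × Int × Int)) (acc : List (Int × Int × Int × Int)),
      r.foldl (fun acc v2 =>
        if |h1.2.2 - h2.2.2| < m ∨ |v1.2.2 - v2.2.2| < m then acc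
        else
          if m ≤ |v2.2.2 - v1.2.2| ∧ m ≤ |h2.2.2 - h1.2.2| ∧ 0 ≤ min v1.2.2 v2.2.2 ∧ 0 ≤ min h1.2.2 h2.2.2 ∧
             min v1.2.2 v2.2.2 + |v2.2.2 - v1.2.2| ≤ W ∧ min h1.2.2 h2.2.2 + |h2.2.2 - h1.2.2| ≤ Ht then
            acc ++ [(min v1.2.2 v2.2.2, min h1.2.2 h2.2.2, |v2.2.2 - v1.2.2|, |h2.2.2 - h1.2.2|)]
          else acc) acc
      = acc ++ (if m ≤ |h1.2.2 - h2.2.2| ∧ 0 ≤ min h1.2.2 h2.2.2 ∧ min h1.2.2 h2.2.2 + |h1.2.2 - h2.2.2| ≤ Ht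
                then List.map (fun xw => (xw.1, min h1.2.2 h2.2.2, xw.2, |h1.2.2 - h2.2.2|))
                       (r.flatMap (fun v2 =>
                        if m ≤ |v1.2.2 - v2.2.2| ∧ 0 ≤ min v1.2.2 v2.2.2 ∧ min v1.2.2 v2.2.2 + |v1.2.2 - v2.2.2| ≤ W
                        then [(min v1.2.2 v2.2.2, |v1.2.2 - v2.2.2|)] else []))
                else []) := by
  intro r
  induction r with
  | nil => intro acc; simp
  | cons b r ih =>
      intro acc
      rw [List.foldl_cons, pv_emit_eq m W Ht h1 h2 v1 b acc, ih]
      by_cases hH : m ≤ |h1.2.2 - h2.2.2| ∧ 0 ≤ min h1.2.2 h2.2.2 ∧ min h1.2.2 h2.2.2 + |h1.2.2 - h2.2.2| ≤ Ht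
      · by_cases hV : m ≤ |v1.2.2 - b.2.2| ∧ 0 ≤ min v1.2.2 b.2.2 ∧ min v1.2.2 b.2.2 + |v1.2.2 - b.2.2| ≤ W
        · simp only [if_pos hH, if_pos hV, if_pos (And.intro hH hV), List.flatMap_cons,
            List.map_append, List.append_assoc]
          simp
        · have hc2 : ¬((m ≤ |h1.2.2 - h2.2.2| ∧ 0 ≤ min h1.2.2 h2.2.2 ∧ min h1.2.2 h2.2.2 + |h1.2.2 - h2.2.2| ≤ Ht) ∧
              m ≤ |v1.2.2 - b.2.2| ∧ 0 ≤ min v1.2.2 b.2.2 ∧ min v1.2.2 b.2.2 + |v1.2.2 - b.2.2| ≤ W) :=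
            fun h => hV h.2
          simp only [if_pos hH, if_neg hV, if_neg hc2, List.flatMap_cons,
            List.nil_append, List.append_nil]
      · have hc : ¬((m ≤ |h1.2.2 - h2.2.2| ∧ 0 ≤ min h1.2.2 h2.2.2 ∧ min h1.2.2 h2.2.2 + |h1.2.2 - h2.2.2| ≤ Ht) ∧
            m ≤ |v1.2.2 - b.2.2| ∧ 0 ≤ min v1.2.2 b.2.2 ∧ min v1.2.2 b.2.2 + |v1.2.2 - b.2.2| ≤ W) :=
          fun h => hH h.1
        simp only [if_neg hH, if_neg hc]
        simp

-- the innermost enumerate's index is unused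
theorem pv_vinner (m W Ht : Int) (h1 h2 v1 : Int × Int × Int) (ys : List (Int × Int × Int)) (t : Int)
    (acc : List (Int × Int × Int × Int)) :
    (PySem.List.enumerate ys t).foldl (fun acc lv =>
        if |h1.2.2 - h2.2.2| < m ∨ |v1.2.2 - lv.2.2.2| < m then acc
        else
          if m ≤ |lv.2.2.2 - v1.2.2| ∧ m ≤ |h2.2.2 - h1.2.2| ∧ 0 ≤ min v1.2.2 lv.2.2.2 ∧ 0 ≤ min h1.2.2 h2.2.2 ∧
             min v1.2.2 lv.2.2.2 + |lv.2.2.2 - v1.2.2| ≤ W ∧ min h1.2.2 h2.2.2 + |h2.2.2 - h1.2.2| ≤ Ht then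
            acc ++ [(min v1.2.2 lv.2.2.2, min h1.2.2 h2.2.2, |lv.2.2.2 - v1.2.2|, |h2.2.2 - h1.2.2|)]
          else acc) acc
    = ys.foldl (fun acc v2 =>
        if |h1.2.2 - h2.2.2| < m ∨ |v1.2.2 - v2.2.2| < m then acc
        else
          if m ≤ |v2.2.2 - v1.2.2| ∧ m ≤ |h2.2.2 - h1.2.2| ∧ 0 ≤ min v1.2.2 v2.2.2 ∧ 0 ≤ min h1.2.2 h2.2.2 ∧
             min v1.2.2 v2.2.2 + |v2.2.2 - v1.2.2| ≤ W ∧ min h1.2.2 h2.2.2 + |h2.2.2 - h1.2.2| ≤ Ht then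
            acc ++ [(min v1.2.2 v2.2.2, min h1.2.2 h2.2.2, |v2.2.2 - v1.2.2|, |h2.2.2 - h1.2.2|)]
          else acc) acc := by
  induction ys generalizing t acc with
  | nil => simp [PySem.List.enumerate]
  | cons c cs ih =>
      rw [PySem.List.enumerate_cons, List.foldl_cons, List.foldl_cons]
      exact ih (t + 1) _

-- the two inner (vertical) loops, for a fixed horizontal pair
theorem pv_vlevel (m W Ht : Int) (h1 h2 : Int × Int × Int) (V : List (Int × Int × Int)) :
    ∀ (xs : List (Int × Int × Int)) (s : Nat) (acc : List (Int × Int × Int × Int)), V.drop s = xs →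
      (PySem.List.enumerate xs (s : Int)).foldl (fun acc kv =>
        (PySem.List.enumerate (PySem.List.slice V (some (kv.1 + 1)) none) (kv.1 + 1)).foldl (fun acc lv =>
          if |h1.2.2 - h2.2.2| < m ∨ |kv.2.2.2 - lv.2.2.2| < m then acc
          else
            if m ≤ |lv.2.2.2 - kv.2.2.2| ∧ m ≤ |h2.2.2 - h1.2.2| ∧ 0 ≤ min kv.2.2.2 lv.2.2.2 ∧ 0 ≤ min h1.2.2 h2.2.2 ∧
               min kv.2.2.2 lv.2.2.2 + |lv.2.2.2 - kv.2.2.2| ≤ W ∧ min h1.2.2 h2.2.2 + |h2.2.2 - h1.2.2| ≤ Ht then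
              acc ++ [(min kv.2.2.2 lv.2.2.2, min h1.2.2 h2.2.2, |lv.2.2.2 - kv.2.2.2|, |h2.2.2 - h1.2.2|)]
            else acc) acc) acc
      = acc ++ (if m ≤ |h1.2.2 - h2.2.2| ∧ 0 ≤ min h1.2.2 h2.2.2 ∧ min h1.2.2 h2.2.2 + |h1.2.2 - h2.2.2| ≤ Ht
                then (pvPairsF m W xs).map (fun xw => (xw.1, min h1.2.2 h2.2.2, xw.2, |h1.2.2 - h2.2.2|)) else []) := by
  intro xs
  induction xs with
  | nil => intro s acc _; simp [PySem.List.enumerate, pvPairsF]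
  | cons a r ih =>
      intro s acc hx
      rw [PySem.List.enumerate_cons, List.foldl_cons]
      have h1c : ((s : Int) + 1) = ((s + 1 : Nat) : Int) := by push_cast; ring
      simp only [h1c, PySem.List.slice_from_natCast, pv_drop_succ V s a r hx]
      rw [pv_vinner, pv_arow, ih (s + 1) _ (pv_drop_succ V s a r hx)]
      by_cases hc : m ≤ |h1.2.2 - h2.2.2| ∧ 0 ≤ min h1.2.2 h2.2.2 ∧ min h1.2.2 h2.2.2 + |h1.2.2 - h2.2.2| ≤ Ht
      · simp [hc, pvPairsF, List.map_append, List.append_assoc]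
      · simp only [if_neg hc, List.append_nil]

-- the h2-enumerate's index is unused
theorem pv_hinner (m W Ht : Int) (a : Int × Int × Int) (V : List (Int × Int × Int))
    (ys : List (Int × Int × Int)) (t : Int) (acc : List (Int × Int × Int × Int)) :
    (PySem.List.enumerate ys t).foldl (fun acc jh =>
      (PySem.List.enumerate V 0).foldl (fun acc kv =>
        (PySem.List.enumerate (PySem.List.slice V (some (kv.1 + 1)) none) (kv.1 + 1)).foldl (fun acc lv =>
          if |a.2.2 - jh.2.2.2| < m ∨ |kv.2.2.2 - lv.2.2.2| < m then acc
          else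
            if m ≤ |lv.2.2.2 - kv.2.2.2| ∧ m ≤ |jh.2.2.2 - a.2.2| ∧ 0 ≤ min kv.2.2.2 lv.2.2.2 ∧ 0 ≤ min a.2.2 jh.2.2.2 ∧
               min kv.2.2.2 lv.2.2.2 + |lv.2.2.2 - kv.2.2.2| ≤ W ∧ min a.2.2 jh.2.2.2 + |jh.2.2.2 - a.2.2| ≤ Ht then
              acc ++ [(min kv.2.2.2 lv.2.2.2, min a.2.2 jh.2.2.2, |lv.2.2.2 - kv.2.2.2|, |jh.2.2.2 - a.2.2|)]
            else acc) acc) acc) acc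
    = ys.foldl (fun acc h2 =>
      (PySem.List.enumerate V 0).foldl (fun acc kv =>
        (PySem.List.enumerate (PySem.List.slice V (some (kv.1 + 1)) none) (kv.1 + 1)).foldl (fun acc lv =>
          if |a.2.2 - h2.2.2| < m ∨ |kv.2.2.2 - lv.2.2.2| < m then acc
          else
            if m ≤ |lv.2.2.2 - kv.2.2.2| ∧ m ≤ |h2.2.2 - a.2.2| ∧ 0 ≤ min kv.2.2.2 lv.2.2.2 ∧ 0 ≤ min a.2.2 h2.2.2 ∧
               min kv.2.2.2 lv.2.2.2 + |lv.2.2.2 - kv.2.2.2| ≤ W ∧ min a.2.2 h2.2.2 + |h2.2.2 - a.2.2| ≤ Ht then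
              acc ++ [(min kv.2.2.2 lv.2.2.2, min a.2.2 h2.2.2, |lv.2.2.2 - kv.2.2.2|, |h2.2.2 - a.2.2|)]
            else acc) acc) acc) acc := by
  induction ys generalizing t acc with
  | nil => simp [PySem.List.enumerate]
  | cons c cs ih =>
      rw [PySem.List.enumerate_cons, List.foldl_cons, List.foldl_cons]
      exact ih (t + 1) _

-- A's loop over later horizontal lines, for a fixed first horizontal line
theorem pv_hrow (m W Ht : Int) (a : Int × Int × Int) (V : List (Int × Int × Int)) :
    ∀ (r : List (Int × Int × Int)) (acc : List (Int × Int × Int × Int)),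
      r.foldl (fun acc h2 =>
        (PySem.List.enumerate V 0).foldl (fun acc kv =>
        (PySem.List.enumerate (PySem.List.slice V (some (kv.1 + 1)) none) (kv.1 + 1)).foldl (fun acc lv =>
          if |a.2.2 - h2.2.2| < m ∨ |kv.2.2.2 - lv.2.2.2| < m then acc
          else
            if m ≤ |lv.2.2.2 - kv.2.2.2| ∧ m ≤ |h2.2.2 - a.2.2| ∧ 0 ≤ min kv.2.2.2 lv.2.2.2 ∧ 0 ≤ min a.2.2 h2.2.2 ∧
               min kv.2.2.2 lv.2.2.2 + |lv.2.2.2 - kv.2.2.2| ≤ W ∧ min a.2.2 h2.2.2 + |h2.2.2 - a.2.2| ≤ Ht then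
              acc ++ [(min kv.2.2.2 lv.2.2.2, min a.2.2 h2.2.2, |lv.2.2.2 - kv.2.2.2|, |h2.2.2 - a.2.2|)]
            else acc) acc) acc) acc
      = acc ++ List.flatMap (fun yh => (pvPairsF m W V).map (fun xw => (xw.1, yh.1, xw.2, yh.2)))
          (r.flatMap (fun h2 =>
            if m ≤ |a.2.2 - h2.2.2| ∧ 0 ≤ min a.2.2 h2.2.2 ∧ min a.2.2 h2.2.2 + |a.2.2 - h2.2.2| ≤ Ht
            then [(min a.2.2 h2.2.2, |a.2.2 - h2.2.2|)] else [])) := by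
  intro r
  induction r with
  | nil => intro acc; simp
  | cons b r ih =>
      intro acc
      rw [List.foldl_cons]
      have hv := pv_vlevel m W Ht a b V V 0 acc (by simp)
      simp only [Nat.cast_zero] at hv
      rw [hv, ih]
      by_cases hcb : m ≤ |a.2.2 - b.2.2| ∧ 0 ≤ min a.2.2 b.2.2 ∧ min a.2.2 b.2.2 + |a.2.2 - b.2.2| ≤ Ht
      · obtain ⟨hc1, hc2, hc3⟩ := hcb
        have h0 := le_min_iff.mp hc2
        simp [hc1, hc2, hc3, h0.1, h0.2, List.append_assoc]
      · simp only [if_neg hcb, List.append_nil, List.flatMap_cons, List.nil_append]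

-- the two outer (horizontal) loops
theorem pv_hlevel (m W Ht : Int) (V H : List (Int × Int × Int)) :
    ∀ (xs : List (Int × Int × Int)) (s : Nat) (acc : List (Int × Int × Int × Int)), H.drop s = xs →
      (PySem.List.enumerate xs (s : Int)).foldl (fun acc ih =>
        (PySem.List.enumerate (PySem.List.slice H (some (ih.1 + 1)) none) (ih.1 + 1)).foldl (fun acc jh =>
          (PySem.List.enumerate V 0).foldl (fun acc kv =>
            (PySem.List.enumerate (PySem.List.slice V (some (kv.1 + 1)) none) (kv.1 + 1)).foldl (fun acc lv =>
              if |ih.2.2.2 - jh.2.2.2| < m ∨ |kv.2.2.2 - lv.2.2.2| < m then acc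
              else
                if m ≤ |lv.2.2.2 - kv.2.2.2| ∧ m ≤ |jh.2.2.2 - ih.2.2.2| ∧ 0 ≤ min kv.2.2.2 lv.2.2.2 ∧ 0 ≤ min ih.2.2.2 jh.2.2.2 ∧
                   min kv.2.2.2 lv.2.2.2 + |lv.2.2.2 - kv.2.2.2| ≤ W ∧ min ih.2.2.2 jh.2.2.2 + |jh.2.2.2 - ih.2.2.2| ≤ Ht then
                  acc ++ [(min kv.2.2.2 lv.2.2.2, min ih.2.2.2 jh.2.2.2, |lv.2.2.2 - kv.2.2.2|, |jh.2.2.2 - ih.2.2.2|)]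
                else acc) acc) acc) acc) acc
      = acc ++ (pvPairsF m Ht xs).flatMap (fun yh => (pvPairsF m W V).map (fun xw => (xw.1, yh.1, xw.2, yh.2))) := by
  intro xs
  induction xs with
  | nil => intro s acc _; simp [PySem.List.enumerate, pvPairsF]
  | cons a r ih =>
      intro s acc hx
      rw [PySem.List.enumerate_cons, List.foldl_cons]
      have h1c : ((s : Int) + 1) = ((s + 1 : Nat) : Int) := by push_cast; ring
      simp only [h1c, PySem.List.slice_from_natCast, pv_drop_succ H s a r hx]
      rw [pv_hinner, pv_hrow, ih (s + 1) _ (pv_drop_succ H s a r hx)]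
      simp [pvPairsF, List.flatMap_append, List.append_assoc]

-- ===== VERDICT (by name: the statement is the Claim_ definition above) =====
theorem form_rectangles_from_lines_spec : Claim_equal_form_rectangles_from_lines := by
  intro h_lines v_lines image_shape min_size _
  unfold Spec_form_rectangles_from_lines
  have hA := pv_hlevel min_size image_shape.2 image_shape.1 v_lines h_lines h_lines 0 [] (by simp)
  simp only [form_rectangles_from_lines, form_rectangles_from_lines_alt, pvValidPairs_eq_pairsF]
  simpa using hA
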